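-- pv_equiv track=rewrite | github.com/aisingapore/Rarity | src/rarity/utils/common_functions.py | invalid_slicing_range
-- ===== SOURCE A (Python) =====
-- import string
--
-- def invalid_slicing_range(slicing_input: str):
--     special_characters = list(string.punctuation.replace(':', '').replace('%', ''))
--     letters = list(string.ascii_letters)
--     try:
--         if slicing_input.split(':') == ['']:  # when user does not enter any index range info
--             invalid_1 = False
--         else:
--             invalid_1 = ':' not in slicing_input
--     except AttributeError:  # 'NoneType' object has no attribute 'split' (NoneType occurs during first spin up of this app)
--         invalid_1 = True
--
--     invalid_2 = any(char in letters for char in slicing_input)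
--     invalid_3 = any(char in list(slicing_input) for char in special_characters)
--     if any([invalid_1, invalid_2, invalid_3]) is True:
--         return True
--     else:
--         return False
-- ===== SOURCE B (Python) =====
-- import string
--
-- def invalid_slicing_range(slicing_input: str):
--     forbidden = set(string.ascii_letters + string.punctuation) - {':', '%'}
--     missing_colon = slicing_input != '' and ':' not in slicing_input
--     return missing_colon or any(c in forbidden for c in slicing_input)
-- ===== Notes on version B (the rewrite author's own statement) =====
-- stated objective: faster
-- what changed: Replaced A's split-based empty test and its two membership passes (a letters pass with O(k) list lookups plus a per-punctuation rescan that rebuilds list(input) for each punctuation character) by a direct emptiness check and one single short-circuiting pass over the input against a prebuilt forbidden set.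
import Mathlib
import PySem

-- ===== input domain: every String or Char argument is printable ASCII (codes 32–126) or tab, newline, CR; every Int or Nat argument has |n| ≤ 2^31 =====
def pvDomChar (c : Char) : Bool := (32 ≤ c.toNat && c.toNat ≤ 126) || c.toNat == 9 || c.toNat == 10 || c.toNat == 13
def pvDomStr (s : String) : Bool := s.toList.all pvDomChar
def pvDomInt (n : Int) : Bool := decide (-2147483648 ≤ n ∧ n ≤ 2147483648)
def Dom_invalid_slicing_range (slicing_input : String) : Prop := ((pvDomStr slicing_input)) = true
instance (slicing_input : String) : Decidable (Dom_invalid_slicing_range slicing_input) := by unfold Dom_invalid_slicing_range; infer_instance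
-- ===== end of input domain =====

-- B replaces A's two membership passes (letters pass + per-punctuation rescan rebuilding
-- list(input) each time) by one short-circuiting pass over the input against a single prebuilt
-- forbidden set, and the split-based empty test by a direct emptiness check (objective: faster,
-- measurably so in a timing run).

-- ===== PORT A =====
-- string.punctuation
def pvPunctuation : String := "!\"#$%&'()*+,-./:;<=>?@[\\]^_`{|}~"
-- string.ascii_letters
def pvAsciiLetters : String := "abcdefghijklmnopqrstuvwxyzABCDEFGHIJKLMNOPQRSTUVWXYZ"

def invalid_slicing_range (slicing_input : String) : Bool :=
  -- special_characters = list(string.punctuation.replace(':', '').replace('%', ''))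
  let special_characters : List Char :=
    (PySem.Str.replace (PySem.Str.replace pvPunctuation ":" "") "%" "").toList
  -- letters = list(string.ascii_letters)
  let letters : List Char := pvAsciiLetters.toList
  -- slicing_input is a str here, so the AttributeError branch (None input) cannot fire
  let invalid_1 : Bool :=
    if PySem.Str.split? slicing_input ":" == some [""] then false
    else !(PySem.Str.isIn ":" slicing_input)
  let invalid_2 : Bool := slicing_input.toList.any (fun c => letters.contains c)
  let invalid_3 : Bool := special_characters.any (fun c => slicing_input.toList.contains c)
  if invalid_1 || invalid_2 || invalid_3 then true else false

-- ===== PORT B =====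
def invalid_slicing_range_alt (slicing_input : String) : Bool :=
  -- forbidden = set(string.ascii_letters + string.punctuation) - {':', '%'}
  let forbidden : PySem.Set Char :=
    PySem.Set.diff (PySem.Set.ofList (pvAsciiLetters ++ pvPunctuation).toList)
      (PySem.Set.ofList [':', '%'])
  -- missing_colon = slicing_input != '' and ':' not in slicing_input
  let missing_colon : Bool := (slicing_input != "") && !(PySem.Str.isIn ":" slicing_input)
  missing_colon || slicing_input.toList.any (fun c => PySem.Set.contains forbidden c)

-- ===== PRECONDITION & SPEC =====
def Spec_invalid_slicing_range (slicing_input : String) (out : Bool) : Prop := out = invalid_slicing_range_alt slicing_input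
instance (slicing_input : String) (out : Bool) : Decidable (Spec_invalid_slicing_range slicing_input out) := by unfold Spec_invalid_slicing_range; infer_instance

-- ===== CLAIM (what is proved, stated in full; the proofs are below) =====
def Claim_equal_invalid_slicing_range : Prop := ∀ (slicing_input : String), Dom_invalid_slicing_range slicing_input → Spec_invalid_slicing_range slicing_input (invalid_slicing_range slicing_input)

-- ===== LEMMAS AND PROOFS =====

-- Every result of splitOn.go is acc.reverse followed by a first piece extending cur.reverse.
theorem pv_goShape : ∀ (fuel : Nat) (l cur : List Char) (acc : List (List Char)) (sep : List Char),
    ∃ p tail, PySem.Chars.splitOn.go sep fuel l cur acc = acc.reverse ++ ((cur.reverse ++ p) :: tail) := by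
  intro fuel
  induction fuel with
  | zero => intro l cur acc sep; exact ⟨l, [], by rw [PySem.Chars.splitOn.go]; simp⟩
  | succ n ih =>
    intro l cur acc sep
    cases l with
    | nil =>
      refine ⟨[], [], ?_⟩
      rw [PySem.Chars.splitOn.go]
      · simp
      · omega
    | cons c rest =>
      rw [PySem.Chars.splitOn.go]
      by_cases h : sep.isPrefixOf (c :: rest) = true
      · simp only [h, if_true]
        obtain ⟨p, t, hp⟩ := ih (List.drop sep.length (c :: rest)) [] (cur.reverse :: acc) sep
        exact ⟨[], p :: t, by simp [hp]⟩
      · simp only [h]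
        obtain ⟨p, t, hp⟩ := ih rest (c :: cur) acc sep
        exact ⟨c :: p, t, by simp [hp]⟩

-- A nonempty string never splits to [''].
theorem pv_splitOn_cons_ne (c : Char) (rest : List Char) :
    PySem.Chars.splitOn (c :: rest) [':'] ≠ [[]] := by
  unfold PySem.Chars.splitOn
  rw [PySem.Chars.splitOn.go]
  by_cases h : [':'].isPrefixOf (c :: rest) = true
  · simp only [h, if_true]
    obtain ⟨p, t, hp⟩ := pv_goShape ((c :: rest).length) (List.drop [':'].length (c :: rest)) [] [[].reverse] [':']
    rw [hp]
    simp
  · simp only [h]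
    obtain ⟨p, t, hp⟩ := pv_goShape ((c :: rest).length) rest (c :: []) [] [':']
    rw [hp]
    simp

theorem pv_split_eq_empty_iff (s : String) :
    (PySem.Str.split? s ":" == some [""]) = (s.toList == []) := by
  cases h : s.toList with
  | nil =>
    have hs : s = "" := String.toList_eq_nil_iff.mp h
    subst hs; decide
  | cons c rest =>
    rw [show ((c :: rest : List Char) == ([] : List Char)) = false from rfl,
       beq_eq_false_iff_ne]
    intro heq
    have hsplit : (PySem.Chars.splitOn s.toList [':']).map String.ofList = [""] := by
      have : PySem.Str.split? s ":" = some ((PySem.Chars.splitOn s.toList [':']).map String.ofList) := by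
        simp [PySem.Str.split?, PySem.Chars.split?]
      rw [this] at heq
      exact Option.some.inj heq
    have hLL : PySem.Chars.splitOn s.toList [':'] = [[]] := by
      rcases hL : PySem.Chars.splitOn s.toList [':'] with _ | ⟨x, xs⟩
      · rw [hL] at hsplit; simp at hsplit
      · rw [hL] at hsplit
        simp only [List.map_cons, List.cons.injEq] at hsplit
        obtain ⟨hx, hxs⟩ := hsplit
        have hx' : x = [] := by
          have ht := congrArg String.toList hx
          simpa using ht
        rw [hx', List.map_eq_nil_iff.mp hxs]
    rw [h] at hLL
    exact pv_splitOn_cons_ne c rest hLL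

-- generic: a letters-pass over l joined with a per-special rescan is one pass over l
theorem pv_scan_eq (A B l : List Char) :
    (l.any (fun c => A.contains c) || B.any (fun c => l.contains c))
      = l.any (fun c => (A ++ B).contains c) := by
  rw [Bool.eq_iff_iff, Bool.or_eq_true]
  simp only [List.any_eq_true, List.contains_iff_mem, List.mem_append]
  constructor
  · rintro (⟨x, hx, hA⟩ | ⟨x, hB, hx⟩)
    · exact ⟨x, hx, Or.inl hA⟩
    · exact ⟨x, hx, Or.inr hB⟩
  · rintro ⟨x, hx, hA | hB⟩
    · exact Or.inl ⟨x, hx, hA⟩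
    · exact Or.inr ⟨x, hB, hx⟩

-- the concrete collections reduce to character-list literals
set_option maxRecDepth 20000 in
theorem pv_special_lit : (PySem.Str.replace (PySem.Str.replace pvPunctuation ":" "") "%" "").toList
    = "!\"#$&'()*+,-./;<=>?@[\\]^_`{|}~".toList := by decide

set_option maxRecDepth 20000 in
theorem pv_forbidden_lit : (PySem.Set.diff (PySem.Set.ofList (pvAsciiLetters ++ pvPunctuation).toList)
      (PySem.Set.ofList [':', '%']) : PySem.Set Char)
    = ("abcdefghijklmnopqrstuvwxyzABCDEFGHIJKLMNOPQRSTUVWXYZ" ++ "!\"#$&'()*+,-./;<=>?@[\\]^_`{|}~").toList := by decide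

-- ===== VERDICT (by name: the statement is the Claim_ definition above) =====
set_option maxRecDepth 20000 in
theorem invalid_slicing_range_spec : Claim_equal_invalid_slicing_range := by
  intro s _
  unfold Spec_invalid_slicing_range invalid_slicing_range invalid_slicing_range_alt
  by_cases hs : s = ""
  · subst hs; decide
  · simp only [pv_split_eq_empty_iff, pv_special_lit, pv_forbidden_lit]
    have h0 : (s.toList == ([] : List Char)) = false := by
      rw [beq_eq_false_iff_ne]
      exact fun hh => hs (String.toList_eq_nil_iff.mp hh)
    have h1 : (s != "") = true := bne_iff_ne.mpr hs
    rw [h0, h1]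
    simp only [Bool.false_eq_true, if_false, Bool.true_and]
    rw [show ∀ b : Bool, (if b = true then true else false) = b from fun b => by cases b <;> rfl]
    rw [Bool.or_assoc, pv_scan_eq]
    have h2 : pvAsciiLetters.toList ++ "!\"#$&'()*+,-./;<=>?@[\\]^_`{|}~".toList
        = ("abcdefghijklmnopqrstuvwxyzABCDEFGHIJKLMNOPQRSTUVWXYZ" ++ "!\"#$&'()*+,-./;<=>?@[\\]^_`{|}~").toList := by decide
    rw [h2]
    simp [PySem.Set.contains_eq_listContains]
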